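-- pv_equiv track=rewrite | github.com/lionatzion/KryptosCipher | k4_analysis_lib.py | enforce_A_positions
-- ===== SOURCE A (Python) =====
-- from typing import Dict, List, Tuple
--
-- def enforce_A_positions(constraints: Dict[int, str], enforce_positions_1b: List[int], period: int) -> Dict[int, str] | None:
--     """
--     Adds 'A' (zero-shift) constraints at specified positions.
--     Returns the updated constraint map or None if a conflict is found.
--     """
--     out = dict(constraints)
--     for pos1b in enforce_positions_1b:
--         r = (pos1b - 1) % period
--         k = 'A'
--         if r in out and out[r] != k:
--             return None  # Conflict
--         out[r] = k
--     return out
-- ===== SOURCE B (Python) =====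
-- def enforce_A_positions(constraints, enforce_positions_1b, period):
--     """
--     Constraint-centred merge instead of a position loop over a mutated copy:
--     iterate over the EXISTING constraints once, rejecting any whose key is an
--     enforced residue but whose value is not 'A' (the only possible conflict,
--     since every enforced value is 'A'), re-emitting the rest unchanged; then
--     append the genuinely new residues in first-occurrence order.
--     """
--     residues = {(p - 1) % period for p in enforce_positions_1b}
--     merged = []
--     for k, v in constraints.items():
--         if k in residues and v != 'A':
--             return None  # an existing non-'A' constraint sits on an enforced residue
--         merged.append((k, v))
--     seen = set(constraints)
--     for p in enforce_positions_1b: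
--         r = (p - 1) % period
--         if r not in seen:
--             merged.append((r, 'A'))
--             seen.add(r)
--     return dict(merged)
-- ===== Notes on version B (the rewrite author's own statement) =====
-- stated objective: alternative
-- what changed: A loops over the enforce positions, mutating a copied dict and checking each residue against the evolving dict; B inverts the iteration: one pass over the EXISTING constraints rejects any whose key is an enforced residue with a non-'A' value (the only possible conflict, since every enforced value is 'A') and re-emits the rest as a pair list, then a second pass over the positions appends only genuinely new residues, building the result as a merged list rather than by dict mutation.
-- outside the precondition, e.g. on enforce_A_positions({}, [3], 0): A raises ZeroDivisionError, B raises ZeroDivisionError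
import Mathlib
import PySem

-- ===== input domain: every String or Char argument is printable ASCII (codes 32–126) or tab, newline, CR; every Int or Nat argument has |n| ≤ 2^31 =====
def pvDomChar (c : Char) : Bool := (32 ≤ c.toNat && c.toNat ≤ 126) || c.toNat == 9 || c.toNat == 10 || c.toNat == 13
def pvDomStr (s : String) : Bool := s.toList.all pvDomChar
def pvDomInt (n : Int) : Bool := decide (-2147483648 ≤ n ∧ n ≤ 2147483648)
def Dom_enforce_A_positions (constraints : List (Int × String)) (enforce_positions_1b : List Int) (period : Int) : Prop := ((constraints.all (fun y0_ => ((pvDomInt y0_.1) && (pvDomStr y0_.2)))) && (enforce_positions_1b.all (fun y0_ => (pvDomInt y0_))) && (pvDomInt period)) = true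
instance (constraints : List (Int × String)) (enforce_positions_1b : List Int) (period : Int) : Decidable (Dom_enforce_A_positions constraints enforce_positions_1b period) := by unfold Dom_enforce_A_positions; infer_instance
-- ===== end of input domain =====

-- B replaces A's position loop over a mutated dict copy by a constraint-centred merge:
-- one pass over the existing constraints detects conflicts and re-emits them, a second
-- pass appends the genuinely new residues; the result is built as a list, not by mutation.


-- ===== PORT A =====
def eapLoopA (period : Int) (out : PySem.Dict Int String) : List Int → Option (PySem.Dict Int String)
  | [] => some out
  | pos1b :: rest =>
    let r := PySem.Int.mod (pos1b - 1) period
    if (out.get? r).any (fun v => v != "A") then none   -- 'r in out and out[r] != k'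
    else eapLoopA period (out.insert r "A") rest

def enforce_A_positions (constraints : List (Int × String)) (enforce_positions_1b : List Int) (period : Int) : Option (List (Int × String)) :=
  (eapLoopA period (PySem.Dict.ofList constraints) enforce_positions_1b).map PySem.Dict.items

-- ===== PORT B =====
-- first pass: 'for k, v in constraints.items(): if k in residues and v != "A": return None; merged.append((k, v))'
def eapMergeB (residues : PySem.Set Int) : List (Int × String) → Option (List (Int × String))
  | [] => some []
  | kv :: rest =>
    if PySem.Set.contains residues kv.1 && kv.2 != "A" then none
    else (eapMergeB residues rest).map (fun t => kv :: t)

-- second pass: 'if r not in seen: merged.append((r, "A")); seen.add(r)'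
def eapStepB (period : Int) (st : List (Int × String) × PySem.Set Int) (p : Int) : List (Int × String) × PySem.Set Int :=
  let r := PySem.Int.mod (p - 1) period
  if PySem.Set.contains st.2 r then st else (st.1 ++ [(r, "A")], PySem.Set.add st.2 r)

def enforce_A_positions_alt (constraints : List (Int × String)) (enforce_positions_1b : List Int) (period : Int) : Option (List (Int × String)) :=
  match eapMergeB (PySem.Set.ofList (enforce_positions_1b.map (fun p => PySem.Int.mod (p - 1) period)))
      (PySem.Dict.ofList constraints).items with
  | none => none   -- 'return None' inside the constraints loop
  | some merged =>
    some (PySem.Dict.ofList ((enforce_positions_1b.foldl (eapStepB period)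
      (merged, PySem.Set.ofList (PySem.Dict.ofList constraints).keys)).1)).items   -- 'return dict(merged)' 

-- ===== PRECONDITION & SPEC =====
-- Pre_ excludes exactly the inputs where the Python raises ZeroDivisionError:
-- period = 0 with a nonempty position list (the '%' is evaluated in both A and B).
def Pre_enforce_A_positions (constraints : List (Int × String)) (enforce_positions_1b : List Int) (period : Int) : Prop :=
  enforce_positions_1b = [] ∨ period ≠ 0
instance (constraints : List (Int × String)) (enforce_positions_1b : List Int) (period : Int) : Decidable (Pre_enforce_A_positions constraints enforce_positions_1b period) := by unfold Pre_enforce_A_positions; infer_instance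

def pvWitness_enforce_A_positions : (List (Int × String)) × List Int × Int := ([(0, "A"), (2, "B")], [1, 4], 3)

def Spec_enforce_A_positions (constraints : List (Int × String)) (enforce_positions_1b : List Int) (period : Int) (out : Option (List (Int × String))) : Prop := out = enforce_A_positions_alt constraints enforce_positions_1b period
instance (constraints : List (Int × String)) (enforce_positions_1b : List Int) (period : Int) (out : Option (List (Int × String))) : Decidable (Spec_enforce_A_positions constraints enforce_positions_1b period out) := by unfold Spec_enforce_A_positions; infer_instance

-- ===== CLAIM (what is proved, stated in full; the proofs are below) =====
def Claim_equal_enforce_A_positions : Prop := ∀ (constraints : List (Int × String)) (enforce_positions_1b : List Int) (period : Int), Dom_enforce_A_positions constraints enforce_positions_1b period → Pre_enforce_A_positions constraints enforce_positions_1b period → Spec_enforce_A_positions constraints enforce_positions_1b period (enforce_A_positions constraints enforce_positions_1b period)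

-- ===== LEMMAS AND PROOFS =====

-- abbreviations used by the proofs only
def eapIns (d : PySem.Dict Int String) (r : Int) : PySem.Dict Int String := d.insert r "A"
def eapBad (d : PySem.Dict Int String) (r : Int) : Bool := (d.get? r).any (fun v => v != "A")

-- overwriting a key with the value it already has is a no-op (unique keys)
theorem eap_map_id (k : Int) (v : String) : ∀ (l : List (Int × String)),
    (l.map Prod.fst).Nodup → (l.find? (fun p => p.1 == k)).map Prod.snd = some v →
    l.map (fun p => if (p.1 == k) = true then (k, v) else p) = l := by
  intro l
  induction l with
  | nil => intro _ h'; simp at h'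
  | cons p t ih =>
    intro hnd h'
    by_cases hk : p.1 = k
    · have hfind : ((p :: t).find? (fun q => q.1 == k)) = some p := by
        simp [hk]
      rw [hfind] at h'
      simp only [Option.map_some, Option.some.injEq] at h'
      have hpt : p = (k, v) := by cases p with | mk a b => simp_all
      subst hpt
      simp only [List.map_cons, beq_self_eq_true, if_pos]
      have ht : t.map (fun q => if (q.1 == k) = true then (k, v) else q) = t := by
        have := List.map_congr_left (l := t)
          (f := fun q : Int × String => if (q.1 == k) = true then (k, v) else q) (g := id)
          (fun q hq => by
            have hqk : q.1 ≠ k := by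
              simp only [List.map_cons, List.nodup_cons] at hnd
              intro hqk
              exact hnd.1 (hqk ▸ List.mem_map_of_mem hq)
            simp [hqk])
        rw [this, List.map_id]
      rw [ht]
    · simp only [List.map_cons, List.nodup_cons] at hnd
      have hfind : ((p :: t).find? (fun q => q.1 == k)) = t.find? (fun q => q.1 == k) := by
        simp [hk]
      rw [hfind] at h'
      have hbk : (p.1 == k) = false := by simp [hk]
      simp only [List.map_cons, hbk, Bool.false_eq_true, if_neg, ih hnd.2 h']
      simp

theorem eap_insert_eq_self (d : PySem.Dict Int String) (k : Int) (v : String)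
    (hnd : d.keys.Nodup) (h : d.get? k = some v) : d.insert k v = d := by
  have hc : d.contains k = true := by
    rw [PySem.Dict.contains_eq_isSome_get?, h]; rfl
  have hitems := eap_map_id k v d.items hnd h
  show PySem.Dict.insert d k v = d
  rw [PySem.Dict.insert, if_pos hc, hitems]

theorem eap_bad_insert (d : PySem.Dict Int String) (r : Int) (h : eapBad d r = false)
    (x : Int) : eapBad (eapIns d r) x = eapBad d x := by
  by_cases hx : x = r
  · subst hx
    simp only [eapBad, eapIns] at *
    rw [PySem.Dict.get?_insert_self]
    simp only [Option.any_some]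
    rw [h]; decide
  · simp only [eapBad, eapIns]
    rw [PySem.Dict.get?_insert_of_ne d "A" hx]

-- A's loop = "any conflict against the running dict? else fold of inserts"
theorem eap_loop_char (period : Int) : ∀ (ps : List Int) (d : PySem.Dict Int String),
    eapLoopA period d ps =
      if (ps.map (fun p => PySem.Int.mod (p - 1) period)).any (eapBad d) then none
      else some ((ps.map (fun p => PySem.Int.mod (p - 1) period)).foldl eapIns d) := by
  intro ps
  induction ps with
  | nil => intro d; simp [eapLoopA]
  | cons p rest ih =>
    intro d
    rw [eapLoopA]
    by_cases hb : eapBad d (PySem.Int.mod (p - 1) period) = true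
    · rw [if_pos (by exact hb), List.map_cons, List.any_cons, hb]
      simp
    · have hb' : eapBad d (PySem.Int.mod (p - 1) period) = false := by
        simpa using hb
      rw [if_neg (by simp [eapBad] at hb' ⊢; exact hb')]
      rw [ih]
      have hany : ∀ (L : List Int),
          L.any (eapBad (d.insert (PySem.Int.mod (p - 1) period) "A")) = L.any (eapBad d) := by
        intro L
        induction L with
        | nil => rfl
        | cons a t iht =>
          have hb2 := eap_bad_insert d (PySem.Int.mod (p - 1) period) hb' a
          simp only [eapIns] at hb2
          simp [List.any_cons, iht, hb2]
      rw [hany]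
      rw [List.map_cons, List.any_cons, hb', Bool.false_or]
      congr 1

-- B's first pass = "any conflict in the items list? else the items list unchanged"
theorem eap_merge_char (R : PySem.Set Int) : ∀ (l : List (Int × String)),
    eapMergeB R l =
      if l.any (fun kv => PySem.Set.contains R kv.1 && kv.2 != "A") then none else some l := by
  intro l
  induction l with
  | nil => simp [eapMergeB]
  | cons kv rest ih =>
    rw [eapMergeB, ih]
    cases hcond : (PySem.Set.contains R kv.1 && kv.2 != "A") with
    | true =>
      rw [if_pos rfl, List.any_cons, hcond, Bool.true_or, if_pos rfl]
    | false =>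
      rw [if_neg Bool.false_ne_true, List.any_cons, hcond, Bool.false_or]
      cases h2 : rest.any (fun kv => PySem.Set.contains R kv.1 && kv.2 != "A") with
      | true => rw [if_pos rfl, if_pos rfl]; rfl
      | false => rw [if_neg Bool.false_ne_true, if_neg Bool.false_ne_true]; rfl

-- the two conflict tests agree (unique keys)
theorem eap_conflict_eq (d : PySem.Dict Int String) (L : List Int) (hnd : d.keys.Nodup) :
    L.any (eapBad d) =
      d.items.any (fun kv => PySem.Set.contains (PySem.Set.ofList L) kv.1 && kv.2 != "A") := by
  rw [Bool.eq_iff_iff]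
  simp only [List.any_eq_true]
  constructor
  · rintro ⟨r, hr, hbad⟩
    simp only [eapBad, Option.any_eq_true] at hbad
    obtain ⟨v, hv, hne⟩ := hbad
    refine ⟨(r, v), (PySem.Dict.get?_eq_some_iff_mem_items d r v hnd).mp hv, ?_⟩
    have hcont : PySem.Set.contains (PySem.Set.ofList L) r = true :=
      (PySem.Set.contains_iff _ r).mpr ((PySem.Set.mem_ofList L r).mpr hr)
    rw [hcont, hne]; rfl
  · rintro ⟨kv, hmem, h⟩
    simp only [Bool.and_eq_true] at h
    refine ⟨kv.1, (PySem.Set.mem_ofList L kv.1).mp ((PySem.Set.contains_iff _ kv.1).mp h.1), ?_⟩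
    have hget : d.get? kv.1 = some kv.2 :=
      (PySem.Dict.get?_eq_some_iff_mem_items d kv.1 kv.2 hnd).mpr (by simpa using hmem)
    simp [eapBad, hget, h.2]

-- a pair list with distinct keys round-trips through dict()
theorem eap_ofList_items : ∀ (l : List (Int × String)),
    (l.map Prod.fst).Nodup → (PySem.Dict.ofList l).items = l := by
  intro l hnd
  have h := PySem.Dict.items_foldl_insert_fresh l Prod.fst Prod.snd PySem.Dict.empty
    (fun a _ => PySem.Dict.contains_empty _) hnd
  have hofl : PySem.Dict.ofList l = l.foldl (fun d a => d.insert a.1 a.2) PySem.Dict.empty := rfl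
  rw [hofl]
  simpa using h

-- invariant: B's append pass tracks A's insert fold (no conflicts on the remaining positions)
theorem eap_fold_rel (per : Int) : ∀ (ps : List Int) (d : PySem.Dict Int String) (s : PySem.Set Int),
    d.keys.Nodup →
    (∀ k, PySem.Set.contains s k = d.contains k) →
    (∀ p ∈ ps, eapBad d (PySem.Int.mod (p - 1) per) = false) →
    (ps.foldl (eapStepB per) (d.items, s)).1
        = ((ps.map (fun p => PySem.Int.mod (p - 1) per)).foldl eapIns d).items
    ∧ ((ps.map (fun p => PySem.Int.mod (p - 1) per)).foldl eapIns d).keys.Nodup := by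
  intro ps
  induction ps with
  | nil => intro d s hnd _ _; exact ⟨rfl, hnd⟩
  | cons p rest ih =>
    intro d s hnd hseen hbad
    have hbp : eapBad d (PySem.Int.mod (p - 1) per) = false := hbad p List.mem_cons_self
    have hbrest : ∀ q ∈ rest, eapBad (eapIns d (PySem.Int.mod (p - 1) per)) (PySem.Int.mod (q - 1) per) = false := by
      intro q hq
      rw [eap_bad_insert d _ hbp]
      exact hbad q (List.mem_cons_of_mem _ hq)
    have hnd' : (eapIns d (PySem.Int.mod (p - 1) per)).keys.Nodup :=
      PySem.Dict.nodup_keys_insert d _ _ hnd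
    rw [List.foldl_cons, List.map_cons, List.foldl_cons, eapStepB]
    by_cases hc : PySem.Set.contains s (PySem.Int.mod (p - 1) per) = true
    · -- residue already present: A's insert is a no-op, B skips
      have hcont : d.contains (PySem.Int.mod (p - 1) per) = true := by
        rw [← hseen]; exact hc
      have hsome : (d.get? (PySem.Int.mod (p - 1) per)).isSome := by
        rw [← PySem.Dict.contains_eq_isSome_get?]; exact hcont
      obtain ⟨v, hv⟩ := Option.isSome_iff_exists.mp hsome
      have hvA : v = "A" := by
        simp only [eapBad, hv, Option.any_some] at hbp
        simpa using hbp
      have hid : eapIns d (PySem.Int.mod (p - 1) per) = d :=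
        eap_insert_eq_self d _ "A" hnd (hvA ▸ hv)
      rw [if_pos hc]
      rw [show eapIns d (PySem.Int.mod (p - 1) per) = d from hid]
      exact ih d s hnd hseen (fun q hq => hbad q (List.mem_cons_of_mem _ hq))
    · -- new residue: A appends (r, "A"), B appends and records it
      have hc' : PySem.Set.contains s (PySem.Int.mod (p - 1) per) = false := by
        simpa using hc
      have hcont : d.contains (PySem.Int.mod (p - 1) per) = false := by
        rw [← hseen]; exact hc'
      have hitems : (eapIns d (PySem.Int.mod (p - 1) per)).items
          = d.items ++ [(PySem.Int.mod (p - 1) per, "A")] :=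
        PySem.Dict.items_insert_of_not_contains d _ hcont
      have hseen' : ∀ k, PySem.Set.contains (PySem.Set.add s (PySem.Int.mod (p - 1) per)) k
          = (eapIns d (PySem.Int.mod (p - 1) per)).contains k := by
        intro k
        have hadd : PySem.Set.add s (PySem.Int.mod (p - 1) per) = s ++ [PySem.Int.mod (p - 1) per] :=
          PySem.Set.add_of_not_mem (fun hm => by
            rw [(PySem.Set.contains_iff s _).mpr hm] at hc'; exact Bool.false_ne_true hc'.symm)
        rw [Bool.eq_iff_iff, hadd]
        simp only [eapIns]
        rw [PySem.Dict.contains_insert]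
        constructor
        · intro h
          have hm := (PySem.Set.contains_iff _ k).mp h
          rcases List.mem_append.mp hm with h1 | h1
          · have hs : PySem.Set.contains s k = true := (PySem.Set.contains_iff s k).mpr h1
            rw [hseen] at hs
            simp [hs]
          · have : k = PySem.Int.mod (p - 1) per := List.mem_singleton.mp h1
            simp [this]
        · intro h
          apply (PySem.Set.contains_iff _ k).mpr
          have h' : (k == PySem.Int.mod (p - 1) per) = true ∨ d.contains k = true := by
            simpa using h
          rcases h' with h1 | h1
          · exact List.mem_append.mpr (Or.inr (List.mem_singleton.mpr (by simpa using h1)))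
          · rw [← hseen] at h1
            exact List.mem_append.mpr (Or.inl ((PySem.Set.contains_iff s k).mp h1))
      rw [if_neg (by simpa using hc')]
      have := ih (eapIns d (PySem.Int.mod (p - 1) per)) (PySem.Set.add s (PySem.Int.mod (p - 1) per))
        hnd' hseen' hbrest
      rw [← hitems]
      exact this

-- ===== VERDICT (by name: the statement is the Claim_ definition above) =====
theorem enforce_A_positions_spec : Claim_equal_enforce_A_positions := by
  intro c ps per _ _
  show enforce_A_positions c ps per = enforce_A_positions_alt c ps per
  have hnd := PySem.Dict.nodup_keys_ofList (ν := String) c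
  unfold enforce_A_positions enforce_A_positions_alt
  rw [eap_loop_char, eap_merge_char,
    ← eap_conflict_eq (PySem.Dict.ofList c) (ps.map (fun p => PySem.Int.mod (p - 1) per)) hnd]
  by_cases h : (ps.map (fun p => PySem.Int.mod (p - 1) per)).any (eapBad (PySem.Dict.ofList c)) = true
  · rw [if_pos h, if_pos h]; rfl
  · rw [if_neg h, if_neg h]
    have h' : (ps.map (fun p => PySem.Int.mod (p - 1) per)).any (eapBad (PySem.Dict.ofList c)) = false := by
      simpa using h
    have hbad : ∀ p ∈ ps, eapBad (PySem.Dict.ofList c) (PySem.Int.mod (p - 1) per) = false := by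
      intro p hp
      simpa using List.any_eq_false.mp h' _ (List.mem_map_of_mem hp)
    have hseen : ∀ k, PySem.Set.contains (PySem.Set.ofList (PySem.Dict.ofList c).keys) k
        = (PySem.Dict.ofList c).contains k := by
      intro k
      rw [Bool.eq_iff_iff]
      constructor
      · intro hk
        exact (PySem.Dict.contains_iff_mem_keys _ _).mpr
          ((PySem.Set.mem_ofList _ k).mp ((PySem.Set.contains_iff _ k).mp hk))
      · intro hk
        exact (PySem.Set.contains_iff _ k).mpr
          ((PySem.Set.mem_ofList _ k).mpr ((PySem.Dict.contains_iff_mem_keys _ _).mp hk))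
    obtain ⟨heq, hnd'⟩ := eap_fold_rel per ps (PySem.Dict.ofList c)
      (PySem.Set.ofList (PySem.Dict.ofList c).keys) hnd hseen hbad
    simp only [Option.map_some]
    rw [heq, eap_ofList_items _ (by simpa [PySem.Dict.keys] using hnd')]
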